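-- pv_equiv track=rewrite | github.com/NaayoungKwon/AlgorithmStudy | 백준/Gold/18808. 스티커 붙이기/스티커 붙이기.py | solution
-- ===== SOURCE A (Python) =====
-- def 회전(sticker):
--     n = len(sticker);
--     m = len(sticker[0]);
--     new_sticker = [[0] * n for _ in range(m)];
--     for i in range(n):
--         for j in range(m):
--             new_sticker[j][n-1-i] = sticker[i][j];
--     return new_sticker;
--
-- def 붙일수있나(pan, n,m,x,y,sticker):
--     flag = False;
--     for i in range(len(sticker)):
--         for j in range(len(sticker[0])):
--             if pan[i+x][j+y] == 1 and sticker[i][j] == 1: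
--                 return False;
--     for i in range(len(sticker)):
--         for j in range(len(sticker[0])):
--             if sticker[i][j] == 1:
--                 pan[i+x][j+y] = 1;
--     return True;
--
-- def 갯수(sticker):
--     cnt = 0;
--     for i in range(len(sticker)):
--         for j in range(len(sticker[0])):
--             if sticker[i][j] == 1:
--                 cnt += 1;
--     return cnt;
--
-- def solution(n, m, k, stickers):
--     result = 0;
--     pan = [[0] * m for _ in range(n)];
--     for i in range(k):     # 스티커 별로
--         sticker = stickers[i][:];
--         for _ in range(4): # 90도 씩 회전
--             is_attached = False;
--             if len(sticker) > n or len(sticker[0]) > m: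
--                 sticker = 회전(sticker);
--                 continue;
--             for x in range(n -len(sticker)+1):
--                 for y in range(m-len(sticker[0]) +1):
--                     is_attached = 붙일수있나(pan,n,m, x,y,sticker);
--                     if is_attached:
--                         result += 갯수(sticker);
--                         break;
--                 if is_attached:
--                     break;
--             if is_attached:
--                 break;
--             else:
--                 sticker = 회전(sticker);
--     return result;
-- ===== SOURCE B (Python) =====
-- def solution(n, m, k, stickers):
--     # Sparse re-implementation: the board is a set of occupied (row, col) pairs and
--     # each sticker a list of its 1-cell coordinates; for each rotation the set of
--     # blocked top-left positions is computed once by offsetting every occupied cell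
--     # by every sticker cell, and the first free position in row-major order is taken.
--     occupied = set()
--     result = 0
--     for idx in range(k):
--         st = stickers[idx]
--         w = len(st[0])
--         cells = [(i, j) for i, row in enumerate(st) for j, v in enumerate(row[:w]) if v == 1]
--         h = len(st)
--         for _ in range(4):
--             if h <= n and w <= m:
--                 blocked = {(bx - i, by - j) for (bx, by) in occupied for (i, j) in cells}
--                 pos = next(((x, y) for x in range(n - h + 1) for y in range(m - w + 1)
--                             if (x, y) not in blocked), None)
--                 if pos is not None:
--                     x, y = pos
--                     occupied.update((x + i, y + j) for (i, j) in cells)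
--                     result += len(cells)
--                     break
--             cells = [(j, h - 1 - i) for (i, j) in cells]
--             h, w = w, h
--     return result
-- ===== Notes on version B (the rewrite author's own statement) =====
-- stated objective: alternative
-- what changed: B drops A's dense 2D grid entirely: the board is a sparse set of occupied (row,col) pairs and each sticker a list of its 1-cell coordinates (rotated as coordinates); per rotation the set of blocked top-left positions is computed once by offsetting every occupied cell by every sticker cell, and the first free row-major position is picked with an O(1) set test, so A's per-position cell-by-cell overlap scan disappears.
-- outside the precondition, e.g. on solution(1, 1, 1, [[[]]]): A returns 0, B returns 0; on solution(2, 2, 1, [[[1, 1], [0]]]): A raises IndexError, B returns 2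
import Mathlib
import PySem

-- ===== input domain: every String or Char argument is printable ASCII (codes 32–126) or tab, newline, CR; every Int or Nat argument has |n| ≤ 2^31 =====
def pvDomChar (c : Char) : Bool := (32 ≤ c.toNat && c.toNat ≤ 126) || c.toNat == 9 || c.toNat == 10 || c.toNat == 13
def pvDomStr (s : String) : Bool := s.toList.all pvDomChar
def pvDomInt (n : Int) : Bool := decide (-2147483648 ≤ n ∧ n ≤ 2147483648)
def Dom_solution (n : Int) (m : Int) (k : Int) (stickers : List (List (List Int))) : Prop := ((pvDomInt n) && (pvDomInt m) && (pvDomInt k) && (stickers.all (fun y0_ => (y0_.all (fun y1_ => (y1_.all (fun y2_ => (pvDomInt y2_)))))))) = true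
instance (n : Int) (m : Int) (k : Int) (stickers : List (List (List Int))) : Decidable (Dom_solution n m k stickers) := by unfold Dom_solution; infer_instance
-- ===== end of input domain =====

-- B drops the dense 2D grid: the board is a sparse set of occupied coordinates, stickers are
-- 1-cell coordinate lists, and per rotation a blocked-position set replaces the per-position
-- cell scan (alternative algorithm; return value proved equal on Pre_).

-- ===== PORT A =====
-- 회전: rotated[j][n-1-i] = sticker[i][j], i.e. rotated[j][c] = sticker[n-1-c][j]
def rotGrid (st : List (List Int)) : List (List Int) :=
  (List.range (st.headD []).length).map (fun j =>
    (List.range st.length).map (fun c => (st.getD (st.length - 1 - c) []).getD j 0))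

-- first loop of 붙일수있나: does a 1-cell of the sticker hit a 1-cell of pan?
def overlapA (pan st : List (List Int)) (x y : Nat) : Bool :=
  (List.range st.length).any (fun i => (List.range (st.headD []).length).any (fun j =>
    ((pan.getD (i+x) []).getD (j+y) 0 == 1) && ((st.getD i []).getD j 0 == 1)))

-- second loop of 붙일수있나: write the sticker's 1-cells to pan
def stampA (pan st : List (List Int)) (x y : Nat) : List (List Int) :=
  (List.range st.length).foldl (fun p i =>
    (List.range (st.headD []).length).foldl (fun p' j =>
      if (st.getD i []).getD j 0 == 1 then p'.modify (i+x) (fun row => row.set (j+y) 1) else p') p) pan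

-- 붙일수있나: none = returned False (pan untouched), some pan' = returned True after mutating pan
def attachA (pan st : List (List Int)) (x y : Nat) : Option (List (List Int)) :=
  if overlapA pan st x y then none else some (stampA pan st x y)

-- 갯수
def countA (st : List (List Int)) : Int :=
  (List.range st.length).foldl (fun c i =>
    (List.range (st.headD []).length).foldl (fun c' j =>
      if (st.getD i []).getD j 0 == 1 then c' + 1 else c') c) 0

-- inner 'for y in range(...)' with break on success
def placeYA (pan st : List (List Int)) (x : Nat) : List Nat → Option (List (List Int))
  | [] => none
  | y :: ys =>
    match attachA pan st x y with
    | some p => some p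
    | none => placeYA pan st x ys

-- outer 'for x in range(...)' with break on success
def placeXA (pan st : List (List Int)) (yl : List Nat) : List Nat → Option (List (List Int))
  | [] => none
  | x :: xs =>
    match placeYA pan st x yl with
    | some p => some p
    | none => placeXA pan st yl xs

-- 'for _ in range(4)' with break on success
def rotLoopA (n m : Int) : Nat → List (List Int) → List (List Int) → Int → List (List Int) × Int
  | 0, _, pan, res => (pan, res)
  | t+1, st, pan, res =>
    if ((st.length : Int) > n ∨ (((st.headD []).length : Int) > m)) then
      rotLoopA n m t (rotGrid st) pan res
    else
      match placeXA pan st (List.range ((m - (st.headD []).length + 1).toNat))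
              (List.range ((n - st.length + 1).toNat)) with
      | some p => (p, res + countA st)
      | none => rotLoopA n m t (rotGrid st) pan res

def solution (n : Int) (m : Int) (k : Int) (stickers : List (List (List Int))) : Int :=
  ((List.range k.toNat).foldl (fun (s : List (List Int) × Int) i =>
      rotLoopA n m 4 (stickers.getD i []) s.1 s.2)
    ((List.range n.toNat).map (fun _ => List.replicate m.toNat (0 : Int)), 0)).2

-- ===== PORT B =====
-- cells = [(i, j) for i, row in enumerate(st) for j, v in enumerate(row[:w]) if v == 1]
def cellsOfB (st : List (List Int)) (w : Int) : List (Int × Int) :=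
  (PySem.List.enumerate st).flatMap (fun p =>
    (PySem.List.enumerate (PySem.List.slice p.2 none (some w))).filterMap (fun q =>
      if q.2 == 1 then some (p.1, q.1) else none))

-- blocked = {(bx - i, by - j) for (bx, by) in occupied for (i, j) in cells}
def blockedB (occ cl : List (Int × Int)) : PySem.Set (Int × Int) :=
  PySem.Set.ofList (occ.flatMap (fun b => cl.map (fun c => (b.1 - c.1, b.2 - c.2))))

-- the generator ((x, y) for x … for y … if (x, y) not in blocked) consumed by next(…, None)
def findYB (blocked : List (Int × Int)) (x : Int) : List Int → Option (Int × Int)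
  | [] => none
  | y :: ys => if blocked.contains (x, y) then findYB blocked x ys else some (x, y)

def findXB (blocked : List (Int × Int)) (yl : List Int) : List Int → Option (Int × Int)
  | [] => none
  | x :: xs =>
    match findYB blocked x yl with
    | some p => some p
    | none => findXB blocked yl xs

-- 'for _ in range(4)': try to place the coordinate list, else rotate the coordinates
def rotLoopB (n m : Int) : Nat → List (Int × Int) → Int → Int → List (Int × Int) → Int → List (Int × Int) × Int
  | 0, _, _, _, occ, res => (occ, res)
  | t+1, cl, h, w, occ, res =>
    if h ≤ n ∧ w ≤ m then
      match findXB (blockedB occ cl) (PySem.List.pyRange 0 (m - w + 1)) (PySem.List.pyRange 0 (n - h + 1)) with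
      | some xy => (cl.foldl (fun o c => PySem.Set.add o (xy.1 + c.1, xy.2 + c.2)) occ, res + (cl.length : Int))
      | none => rotLoopB n m t (cl.map (fun c => (c.2, h - 1 - c.1))) w h occ res
    else rotLoopB n m t (cl.map (fun c => (c.2, h - 1 - c.1))) w h occ res

def solution_alt (n : Int) (m : Int) (k : Int) (stickers : List (List (List Int))) : Int :=
  ((List.range k.toNat).foldl (fun (s : List (Int × Int) × Int) i =>
      let st := stickers.getD i []
      rotLoopB n m 4 (cellsOfB st ((st.headD []).length : Int)) (st.length : Int)
        ((st.headD []).length : Int) s.1 s.2)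
    ([], 0)).2

-- ===== PRECONDITION & SPEC =====
-- a sticker the Python runs without raising: nonempty, first row nonempty,
-- and no row shorter than the first (extra cells beyond the first row's width are ignored)
def okStickerB (st : List (List Int)) : Bool :=
  match st with
  | [] => false
  | r0 :: _ => decide (0 < r0.length) && st.all (fun row => decide (r0.length ≤ row.length))

-- Pre_ excludes exactly the inputs where Python raises IndexError (k beyond the list, an empty
-- sticker, a row shorter than the first row) and stickers with an empty first row, on which A
-- raises IndexError as soon as a rotation is attempted and contributes 0 cells otherwise.
def Pre_solution (n : Int) (m : Int) (k : Int) (stickers : List (List (List Int))) : Prop :=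
  k ≤ (stickers.length : Int) ∧ (stickers.take k.toNat).all okStickerB = true
instance (n : Int) (m : Int) (k : Int) (stickers : List (List (List Int))) : Decidable (Pre_solution n m k stickers) := by unfold Pre_solution; infer_instance

def pvWitness_solution : Int × Int × Int × List (List (List Int)) :=
  (2, 2, 1, [[[1, 0], [1, 1]]])

def Spec_solution (n : Int) (m : Int) (k : Int) (stickers : List (List (List Int))) (out : Int) : Prop := out = solution_alt n m k stickers
instance (n : Int) (m : Int) (k : Int) (stickers : List (List (List Int))) (out : Int) : Decidable (Spec_solution n m k stickers out) := by unfold Spec_solution; infer_instance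

-- ===== CLAIM (what is proved, stated in full; the proofs are below) =====
def Claim_equal_solution : Prop := ∀ (n : Int) (m : Int) (k : Int) (stickers : List (List (List Int))), Dom_solution n m k stickers → Pre_solution n m k stickers → Spec_solution n m k stickers (solution n m k stickers)

-- ===== LEMMAS AND PROOFS =====

-- shape of the pan and the two cross-representation relations ----------------

def panShape (nn mm : Nat) (pa : List (List Int)) : Prop :=
  pa.length = nn ∧ ∀ q, q < nn → (pa.getD q []).length = mm

-- (a, b) names a 1-cell of the sticker grid st (inside the first row's width)
def oneAt (st : List (List Int)) (p : Int × Int) : Prop :=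
  ∃ i j : Nat, i < st.length ∧ j < (st.headD []).length ∧ p = ((i : Int), (j : Int))
    ∧ (st.getD i []).getD j 0 = 1

-- B's occupied set holds exactly the coordinates of the 1-cells of A's pan
def OccRel (nn mm : Nat) (pa : List (List Int)) (occ : List (Int × Int)) : Prop :=
  ∀ p : Int × Int, p ∈ occ ↔ ∃ i j : Nat, i < nn ∧ j < mm ∧ p = ((i : Int), (j : Int))
    ∧ (pa.getD i []).getD j 0 = 1

def rowsOK (st : List (List Int)) : Prop := ∀ r ∈ st, (st.headD []).length ≤ r.length

theorem pvFilterMapIf {α β : Type} (p : α → Bool) (g : α → β) (l : List α) :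
    l.filterMap (fun x => if p x then some (g x) else none) = (l.filter p).map g := by
  induction l with
  | nil => rfl
  | cons a t ih => by_cases h : p a <;> simp [List.filterMap_cons, List.filter_cons, h, ih]

theorem pvFoldlCongrF {α β : Type} (il : List β) (f g : α → β → α) (a : α)
    (h : ∀ p i, i ∈ il → f p i = g p i) : il.foldl f a = il.foldl g a := by
  induction il generalizing a with
  | nil => rfl
  | cons i tl ih =>
    simp only [List.foldl_cons]
    rw [h a i (by simp)]
    exact ih _ (fun p j hj => h p j (by simp [hj]))

theorem pvCountFold (l : List Nat) (p : Nat → Bool) (c : Int) :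
    l.foldl (fun c' j => if p j then c' + 1 else c') c = c + (l.countP p : Int) := by
  induction l generalizing c with
  | nil => simp
  | cons j tl ih =>
    simp only [List.foldl_cons, List.countP_cons]
    by_cases h : p j = true
    · rw [if_pos h, ih, if_pos h]; push_cast; ring
    · rw [if_neg h, ih, if_neg h]; push_cast; ring

theorem pvFoldRange_getD {β : Type} (st : List (List Int)) (g : β → List Int → β) (b : β) :
    (List.range st.length).foldl (fun c i => g c (st.getD i [])) b = st.foldl g b := by
  induction st generalizing b with
  | nil => rfl
  | cons a tl ih =>
    simp only [List.length_cons, List.range_succ_eq_map, List.foldl_cons, List.foldl_map]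
    have : ∀ (c : β) (i : Nat), g c ((a :: tl).getD (Nat.succ i) []) = g c (tl.getD i []) := by
      intro c i; rfl
    rw [pvFoldlCongrF _ _ (fun c i => g c (tl.getD i [])) _ (fun p i _ => this p i)]
    exact ih (g b a)

theorem pvSliceNat {α : Type} (row : List α) (hl : Nat) :
    PySem.List.slice row none (some (hl : Int)) = row.take hl := by
  rw [PySem.List.slice_to row (by positivity)]
  simp

-- the inner comprehension over one row, as map-of-filter
theorem pvInnerEq (row : List Int) (a1 w : Int) :
    (PySem.List.enumerate (PySem.List.slice row none (some w))).filterMap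
        (fun q => if q.2 == 1 then some (a1, q.1) else none)
      = ((PySem.List.enumerate (PySem.List.slice row none (some w))).filter
          (fun q => q.2 == 1)).map (fun q => (a1, q.1)) :=
  pvFilterMapIf _ _ _

theorem pvInnerMem (row : List Int) (a1 : Int) (hl : Nat) (hrow : hl ≤ row.length)
    (p : Int × Int) :
    p ∈ (PySem.List.enumerate (PySem.List.slice row none (some (hl : Int)))).filterMap
        (fun q => if q.2 == 1 then some (a1, q.1) else none)
      ↔ ∃ l : Nat, l < hl ∧ p = (a1, (l : Int)) ∧ row.getD l 0 = 1 := by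
  rw [pvInnerEq, pvSliceNat]
  constructor
  · intro hp
    rw [List.mem_map] at hp
    obtain ⟨q, hq, hpq⟩ := hp
    rw [List.mem_filter] at hq
    obtain ⟨hqm, hq1⟩ := hq
    rw [PySem.List.mem_enumerate_iff] at hqm
    obtain ⟨l, hlt, hql⟩ := hqm
    rw [List.length_take] at hlt
    refine ⟨l, by omega, ?_, ?_⟩
    · rw [← hpq, hql]; simp
    · rw [hql] at hq1
      simp only [List.getElem_take] at hq1
      rw [List.getD_eq_getElem _ _ (by omega)]
      exact beq_iff_eq.mp hq1
  · rintro ⟨l, hlt, hp, hv⟩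
    rw [List.mem_map]
    refine ⟨((l : Int), row[l]'(by omega)), ?_, ?_⟩
    · rw [List.mem_filter]
      constructor
      · rw [PySem.List.mem_enumerate_iff]
        exact ⟨l, by simp [List.length_take]; omega, by simp [List.getElem_take]⟩
      · rw [List.getD_eq_getElem _ _ (by omega)] at hv
        simp [hv]
    · rw [hp]

theorem pvInnerFst (row : List Int) (a1 w : Int) (p : Int × Int)
    (hp : p ∈ (PySem.List.enumerate (PySem.List.slice row none (some w))).filterMap
        (fun q => if q.2 == 1 then some (a1, q.1) else none)) : p.1 = a1 := by
  rw [List.mem_filterMap] at hp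
  obtain ⟨q, -, hq⟩ := hp
  by_cases h : (q.2 == 1) = true
  · rw [if_pos h, Option.some.injEq] at hq
    rw [← hq]
  · rw [if_neg h] at hq
    cases hq

theorem pvCellsMem (st : List (List Int)) (hrows : rowsOK st) (p : Int × Int) :
    p ∈ cellsOfB st ((st.headD []).length : Int) ↔ oneAt st p := by
  unfold cellsOfB
  rw [List.mem_flatMap]
  constructor
  · rintro ⟨a, ham, hp⟩
    rw [PySem.List.mem_enumerate_iff] at ham
    obtain ⟨k, hk, hak⟩ := ham
    subst hak
    rw [pvInnerMem _ _ _ (hrows st[k] (List.getElem_mem hk)) p] at hp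
    obtain ⟨l, hl, hpl, hv⟩ := hp
    refine ⟨k, l, hk, hl, by simpa using hpl, ?_⟩
    rw [List.getD_eq_getElem _ _ hk]
    exact hv
  · rintro ⟨i, j, hi, hj, hp, hv⟩
    refine ⟨(0 + (i : Int), st[i]), ?_, ?_⟩
    · rw [PySem.List.mem_enumerate_iff]
      exact ⟨i, hi, rfl⟩
    · rw [pvInnerMem _ _ _ (hrows st[i] (List.getElem_mem hi)) p]
      refine ⟨j, hj, by simpa using hp, ?_⟩
      rw [List.getD_eq_getElem _ _ hi] at hv
      exact hv

theorem pvCellsNodup (st : List (List Int)) (w : Int) : (cellsOfB st w).Nodup := by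
  unfold cellsOfB
  rw [List.nodup_flatMap]
  constructor
  · intro a _
    rw [pvInnerEq]
    have hpw : ((PySem.List.enumerate (PySem.List.slice a.2 none (some w))).filter
        (fun q => q.2 == 1)).Pairwise (fun u v => u.1 < v.1) :=
      List.Pairwise.sublist List.filter_sublist (PySem.List.pairwise_lt_enumerate _ _)
    have : (((PySem.List.enumerate (PySem.List.slice a.2 none (some w))).filter
        (fun q => q.2 == 1)).map (fun q => (a.1, q.1))).Pairwise
          (fun u v : Int × Int => u.2 < v.2) := by
      rw [List.pairwise_map]
      exact hpw
    exact this.imp (fun h => by intro he; rw [he] at h; exact lt_irrefl _ h)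
  · have hpw := PySem.List.pairwise_lt_enumerate st 0
    refine hpw.imp ?_
    intro a b hab
    intro x hxa hxb
    have h1 := pvInnerFst a.2 a.1 w x hxa
    have h2 := pvInnerFst b.2 b.1 w x hxb
    omega

theorem pvMapSndEnum {α β : Type} (F : α → β) (xs : List α) (s : Int) :
    (PySem.List.enumerate xs s).map (fun p => F p.2) = xs.map F := by
  induction xs generalizing s with
  | nil => rfl
  | cons a t ih => rw [PySem.List.enumerate_cons, List.map_cons, List.map_cons, ih]

theorem pvCountPEnumSnd (xs : List Int) (s : Int) :
    (PySem.List.enumerate xs s).countP (fun q => q.2 == 1) = xs.countP (fun v => v == 1) := by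
  induction xs generalizing s with
  | nil => rfl
  | cons a t ih => rw [PySem.List.enumerate_cons, List.countP_cons, List.countP_cons, ih]

theorem pvTakeEqMapRange (row : List Int) (hl : Nat) (hrow : hl ≤ row.length) :
    row.take hl = (List.range hl).map (fun j => row.getD j 0) := by
  apply List.ext_getElem
  · rw [List.length_take, List.length_map, List.length_range]; omega
  · intro i h1 h2
    have hi : i < hl := by rw [List.length_take] at h1; omega
    simp only [List.getElem_take, List.getElem_map, List.getElem_range]
    rw [List.getD_eq_getElem _ _ (by omega)]

theorem pvFoldlAddCast {α : Type} (l : List α) (f : α → Nat) (b : Int) :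
    l.foldl (fun c a => c + ((f a : Nat) : Int)) b = b + (((l.map f).sum : Nat) : Int) := by
  induction l generalizing b with
  | nil => simp
  | cons a t ih =>
    simp only [List.foldl_cons, List.map_cons, List.sum_cons]
    rw [ih]
    push_cast
    ring

theorem pvCellsLen (st : List (List Int)) (hrows : rowsOK st) :
    countA st = ((cellsOfB st ((st.headD []).length : Int)).length : Int) := by
  have hL : countA st = 0 + ((st.map (fun row =>
      (List.range (st.headD []).length).countP (fun j => row.getD j 0 == 1))).sum : Int) := by
    unfold countA
    rw [pvFoldlCongrF _ _ (fun c i => c + (((List.range (st.headD []).length).countP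
          (fun j => (st.getD i []).getD j 0 == 1) : Nat) : Int)) _
        (fun c i _ => pvCountFold _ _ _)]
    rw [pvFoldRange_getD st (fun c row => c + (((List.range (st.headD []).length).countP
          (fun j => row.getD j 0 == 1) : Nat) : Int)) 0]
    exact pvFoldlAddCast _ _ _
  rw [hL]
  unfold cellsOfB
  rw [List.length_flatMap]
  rw [List.map_congr_left (l := PySem.List.enumerate st)
    (g := fun p : Int × List Int =>
      (List.range (st.headD []).length).countP (fun j => p.2.getD j 0 == 1)) ?_]
  · rw [pvMapSndEnum (fun row => (List.range (st.headD []).length).countP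
        (fun j => row.getD j 0 == 1)) st 0]
    simp
  · intro a ha
    have hmem : a.2 ∈ st := by
      have := PySem.List.map_snd_enumerate st 0
      exact this ▸ List.mem_map_of_mem ha
    have hrow := hrows a.2 hmem
    rw [pvInnerEq, List.length_map, ← List.countP_eq_length_filter, pvCountPEnumSnd,
        pvSliceNat, pvTakeEqMapRange a.2 _ hrow, List.countP_map]
    rfl

-- rotation ------------------------------------------------------------------

theorem pvRotGrid_len (st : List (List Int)) : (rotGrid st).length = (st.headD []).length := by
  simp [rotGrid]

theorem pvRotGrid_head (st : List (List Int)) (w1 : 1 ≤ (st.headD []).length) :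
    ((rotGrid st).headD []).length = st.length := by
  obtain ⟨w', hw'⟩ : ∃ w', (st.headD []).length = w' + 1 := ⟨(st.headD []).length - 1, by omega⟩
  unfold rotGrid
  rw [hw', List.range_succ_eq_map]
  simp

theorem pvRotGrid_rowsOK (st : List (List Int)) : rowsOK (rotGrid st) := by
  intro r hr
  unfold rotGrid at hr ⊢
  rw [List.mem_map] at hr
  obtain ⟨j, hj, hrj⟩ := hr
  rw [List.mem_range] at hj
  rw [← hrj, List.length_map, List.length_range]
  obtain ⟨w', hw'⟩ : ∃ w', (st.headD []).length = w' + 1 := ⟨(st.headD []).length - 1, by omega⟩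
  rw [hw', List.range_succ_eq_map]
  simp

theorem pvGetDRangeMap {α : Type} (n q : Nat) (f : Nat → α) (d : α) (hq : q < n) :
    ((List.range n).map f).getD q d = f q := by
  simp [List.getD_eq_getElem?_getD, hq]

theorem pvRotGrid_getD (st : List (List Int)) (c d : Nat)
    (hc : c < (st.headD []).length) (hd : d < st.length) :
    ((rotGrid st).getD c []).getD d 0 = (st.getD (st.length - 1 - d) []).getD c 0 := by
  unfold rotGrid
  rw [pvGetDRangeMap _ _ _ _ hc, pvGetDRangeMap _ _ _ _ hd]

theorem pvOneAt_rot (st : List (List Int)) (w1 : 1 ≤ (st.headD []).length) (p : Int × Int) :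
    oneAt (rotGrid st) p ↔ ∃ c, oneAt st c ∧ p = (c.2, (st.length : Int) - 1 - c.1) := by
  constructor
  · rintro ⟨a, b, ha, hb, hp, hv⟩
    rw [pvRotGrid_len] at ha
    rw [pvRotGrid_head st w1] at hb
    rw [pvRotGrid_getD st a b ha hb] at hv
    refine ⟨((st.length - 1 - b : Nat), (a : Nat)), ⟨st.length - 1 - b, a, by omega, ha, rfl, hv⟩, ?_⟩
    rw [hp]
    simp only [Prod.mk.injEq]
    refine ⟨?_, ?_⟩ <;> try simp
    all_goals omega
  · rintro ⟨c, ⟨i, j, hi, hj, hc, hv⟩, hp⟩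
    refine ⟨j, st.length - 1 - i, by rw [pvRotGrid_len]; exact hj,
      by rw [pvRotGrid_head st w1]; omega, ?_, ?_⟩
    · rw [hp, hc]
      simp only [Prod.mk.injEq]
      refine ⟨?_, ?_⟩ <;> try simp
      all_goals omega
    · rw [pvRotGrid_getD st j (st.length - 1 - i) hj (by omega),
          show st.length - 1 - (st.length - 1 - i) = i from by omega]
      exact hv

theorem pvRotInj : Function.Injective (fun (c : Int × Int) => (c.2, (A : Int) - c.1)) := by
  intro a b h
  simp only [Prod.mk.injEq] at h
  obtain ⟨h1, h2⟩ := h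
  exact Prod.ext (by omega) h1

-- count ---------------------------------------------------------------------


-- occupied set --------------------------------------------------------------

theorem pvBlockedMem (occ cl : List (Int × Int)) (x y : Int) :
    ((x, y) ∈ blockedB occ cl) ↔ ∃ c ∈ cl, (x + c.1, y + c.2) ∈ occ := by
  unfold blockedB
  rw [PySem.Set.mem_ofList, List.mem_flatMap]
  constructor
  · rintro ⟨b, hb, hmem⟩
    rw [List.mem_map] at hmem
    obtain ⟨c, hc, hbc⟩ := hmem
    refine ⟨c, hc, ?_⟩
    simp only [Prod.mk.injEq] at hbc
    obtain ⟨h1, h2⟩ := hbc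
    have : b = (x + c.1, y + c.2) := Prod.ext (by omega) (by omega)
    rw [← this]
    exact hb
  · rintro ⟨c, hc, hmem⟩
    refine ⟨(x + c.1, y + c.2), hmem, ?_⟩
    rw [List.mem_map]
    exact ⟨c, hc, Prod.ext (by simp) (by simp)⟩

theorem pvOccUpdateMem (cl occ : List (Int × Int)) (x y : Int) (p : Int × Int) :
    p ∈ cl.foldl (fun o c => PySem.Set.add o (x + c.1, y + c.2)) occ
      ↔ p ∈ occ ∨ ∃ c ∈ cl, p = (x + c.1, y + c.2) := by
  induction cl generalizing occ with
  | nil => simp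
  | cons c t ih =>
    simp only [List.foldl_cons]
    rw [ih, PySem.Set.mem_add]
    constructor
    · rintro (⟨h | h⟩ | ⟨c', hc', h⟩)
      · exact Or.inl h
      · exact Or.inr ⟨c, by simp, h⟩
      · exact Or.inr ⟨c', by simp [hc'], h⟩
    · rintro (h | ⟨c', hc', h⟩)
      · exact Or.inl (Or.inl h)
      · rcases List.mem_cons.mp hc' with h1 | h1
        · exact Or.inl (Or.inr (by rw [h, h1]))
        · exact Or.inr ⟨c', h1, h⟩

-- overlap test --------------------------------------------------------------

theorem pvOverlapIff (nn mm : Nat) (pa st : List (List Int)) (occ cl : List (Int × Int))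
    (hocc : OccRel nn mm pa occ) (hcl : ∀ p, p ∈ cl ↔ oneAt st p)
    (x y : Nat) (hx : x + st.length ≤ nn) (hy : y + (st.headD []).length ≤ mm) :
    overlapA pa st x y = true ↔ ∃ c ∈ cl, ((x : Int) + c.1, (y : Int) + c.2) ∈ occ := by
  unfold overlapA
  simp only [List.any_eq_true, List.mem_range, Bool.and_eq_true, beq_iff_eq]
  constructor
  · rintro ⟨i, hi, j, hj, hpan, hst⟩
    refine ⟨((i : Int), (j : Int)), (hcl _).mpr ⟨i, j, hi, hj, rfl, hst⟩, ?_⟩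
    rw [hocc]
    refine ⟨i + x, j + y, by omega, by omega, ?_, hpan⟩
    simp only [Prod.mk.injEq]
    push_cast
    omega
  · rintro ⟨c, hc, hmem⟩
    obtain ⟨i, j, hi, hj, hcij, hst⟩ := (hcl c).mp hc
    rw [hocc] at hmem
    obtain ⟨a, b, hav, hbv, hab, hpan⟩ := hmem
    rw [hcij] at hab
    simp only [Prod.mk.injEq] at hab
    have ha : a = i + x := by omega
    have hb : b = j + y := by omega
    subst ha hb
    exact ⟨i, hi, j, hj, hpan, hst⟩

-- stamping ------------------------------------------------------------------

theorem pvModifyLenFold (il : List Nat) (F : Nat → List Int → List Int) (x : Nat)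
    (pa : List (List Int)) :
    (il.foldl (fun p i => p.modify (i + x) (F i)) pa).length = pa.length := by
  induction il generalizing pa with
  | nil => rfl
  | cons i tl ih => simp only [List.foldl_cons]; rw [ih, List.length_modify]

-- the inner j-loop of A's stamping, as a function of the touched row
def rowStamp (s : List Int) (w y : Nat) (row : List Int) : List Int :=
  (List.range w).foldl (fun r j => if s.getD j 0 == 1 then r.set (j+y) 1 else r) row

theorem pvModifyModify (l : List (List Int)) (t : Nat) (f g : List Int → List Int) :
    (l.modify t f).modify t g = l.modify t (fun a => g (f a)) := by
  apply List.ext_getElem?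
  intro i
  simp only [List.getElem?_modify]
  cases l[i]? <;> by_cases h : t = i <;> simp [h]

theorem pvModifyId (l : List (List Int)) (t : Nat) : l.modify t (fun a => a) = l := by
  apply List.ext_getElem?
  intro i
  simp only [List.getElem?_modify]
  cases l[i]? <;> by_cases h : t = i <;> simp [h]

theorem pvSetfoldModify (li : List Nat) (c : Nat → Bool) (fj : Nat → List Int → List Int)
    (p : List (List Int)) (t : Nat) :
    li.foldl (fun p' j => if c j then p'.modify t (fj j) else p') p
      = p.modify t (fun row => li.foldl (fun r j => if c j then fj j r else r) row) := by
  induction li generalizing p with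
  | nil => simp [pvModifyId]
  | cons j tl ih =>
    simp only [List.foldl_cons]
    by_cases h : c j = true
    · simp only [h, if_true]
      rw [ih, pvModifyModify]
    · simp only [h, if_false, Bool.false_eq_true]
      rw [ih]

-- A's stamping as a fold of row modifications
theorem pvStampA_eq_fold (pa st : List (List Int)) (x y : Nat) :
    stampA pa st x y = (List.range st.length).foldl
      (fun p i => p.modify (i+x) (rowStamp (st.getD i []) (st.headD []).length y)) pa := by
  unfold stampA
  exact pvFoldlCongrF _ _ _ _ (fun p i _ => pvSetfoldModify _ _ _ _ _)

theorem pvLength_rowStamp (s : List Int) (w y : Nat) (row : List Int) :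
    (rowStamp s w y row).length = row.length := by
  unfold rowStamp
  induction (List.range w) generalizing row with
  | nil => rfl
  | cons j tl ih =>
    simp only [List.foldl_cons]
    by_cases h : (s.getD j 0 == 1) = true
    · rw [if_pos h, ih, List.length_set]
    · rw [if_neg h, ih]

theorem pvGetD_setfold (li : List Nat) (c : Nat → Bool) (e : Nat → Nat) (row : List Int) (q : Nat) :
    (li.foldl (fun r j => if c j then r.set (e j) 1 else r) row).getD q 0
      = if (li.any (fun j => c j && e j == q) && decide (q < row.length)) = true
        then 1 else row.getD q 0 := by
  induction li generalizing row with
  | nil => simp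
  | cons j tl ih =>
    simp only [List.foldl_cons, List.any_cons]
    by_cases h : c j = true
    · simp only [h, if_true, Bool.true_and]
      rw [ih, List.length_set]
      by_cases hq : q < row.length
      · by_cases hrest : tl.any (fun j => c j && e j == q) = true
        · simp [hq, hrest]
        · simp only [hrest, Bool.false_eq_true]
          by_cases he : e j = q
          · subst he
            simp [hq, List.getD_eq_getElem?_getD, List.getElem?_set]
          · have : (e j == q) = false := by simp [he]
            simp [this, hq, List.getD_eq_getElem?_getD, List.getElem?_set, he]
      · have hq' : (decide (q < row.length)) = false := by simp [hq]
        simp only [hq', Bool.and_false, if_false, Bool.false_eq_true]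
        rw [List.getD_eq_default _ _ (by rw [List.length_set]; omega),
            List.getD_eq_default _ _ (by omega)]
    · have h' : c j = false := by simp at h; exact h
      simp only [h', if_false, Bool.false_and, Bool.false_or, Bool.false_eq_true]
      exact ih row

-- row value of the fold of row modifications
theorem pvStampFoldGetD_miss (h x a : Nat) (F : Nat → List Int → List Int)
    (pa : List (List Int)) (ha : a < x ∨ x + h ≤ a) :
    ((List.range h).foldl (fun p i => p.modify (i + x) (F i)) pa).getD a [] = pa.getD a [] := by
  induction h with
  | zero => rfl
  | succ h ih =>
    rw [List.range_succ, List.foldl_append, List.foldl_cons, List.foldl_nil,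
        List.getD_eq_getElem?_getD, List.getElem?_modify]
    cases hq : ((List.range h).foldl (fun p i => p.modify (i + x) (F i)) pa)[a]? with
    | none =>
      have hn : pa[a]? = none := by
        rw [List.getElem?_eq_none_iff] at hq ⊢
        rw [pvModifyLenFold] at hq
        exact hq
      rw [List.getD_eq_getElem?_getD, hn]
      rfl
    | some r =>
      have hthis := ih (show a < x ∨ x + h ≤ a by omega)
      rw [List.getD_eq_getElem?_getD, hq] at hthis
      simp only [Option.getD_some] at hthis
      simp only [Option.map_eq_map, Option.map_some, Option.getD_some]
      rw [if_neg (by omega)]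
      exact hthis

theorem pvStampFoldGetD_hit (h x a : Nat) (F : Nat → List Int → List Int)
    (pa : List (List Int)) (h1 : x ≤ a) (h2 : a < x + h) (h3 : a < pa.length) :
    ((List.range h).foldl (fun p i => p.modify (i + x) (F i)) pa).getD a []
      = F (a - x) (pa.getD a []) := by
  induction h with
  | zero => omega
  | succ h ih =>
    rw [List.range_succ, List.foldl_append, List.foldl_cons, List.foldl_nil,
        List.getD_eq_getElem?_getD, List.getElem?_modify]
    cases hq : ((List.range h).foldl (fun p i => p.modify (i + x) (F i)) pa)[a]? with
    | none =>
      exfalso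
      rw [List.getElem?_eq_none_iff, pvModifyLenFold] at hq
      omega
    | some r =>
      simp only [Option.map_eq_map, Option.map_some, Option.getD_some]
      by_cases hc : h + x = a
      · rw [if_pos hc]
        have hm := pvStampFoldGetD_miss h x a F pa (by omega)
        rw [List.getD_eq_getElem?_getD, hq] at hm
        simp only [Option.getD_some] at hm
        rw [hm, show a - x = h from by omega]
      · rw [if_neg hc]
        have hthis := ih (by omega)
        rw [List.getD_eq_getElem?_getD, hq] at hthis
        simp only [Option.getD_some] at hthis
        exact hthis

theorem pvStampA_getD_hit (pa st : List (List Int)) (x y a b i j : Nat)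
    (hsh : ∀ q, q < pa.length → y + (st.headD []).length ≤ (pa.getD q []).length)
    (hi : i < st.length) (hj : j < (st.headD []).length)
    (ha : a = i + x) (hb : b = j + y) (hone : (st.getD i []).getD j 0 = 1)
    (hlen : a < pa.length) :
    ((stampA pa st x y).getD a []).getD b 0 = 1 := by
  rw [pvStampA_eq_fold]
  have hax : x ≤ a ∧ a < x + st.length := by omega
  rw [pvStampFoldGetD_hit st.length x a _ pa hax.1 hax.2 hlen]
  unfold rowStamp
  rw [pvGetD_setfold]
  have hrow : b < (pa.getD a []).length := by
    have := hsh a hlen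
    omega
  have hany : ((List.range (st.headD []).length).any
      (fun j' => ((st.getD (a - x) []).getD j' 0 == 1) && (j' + y == b))) = true := by
    rw [List.any_eq_true]
    refine ⟨j, List.mem_range.mpr hj, ?_⟩
    rw [show a - x = i from by omega, hone, hb]
    simp
  rw [if_pos (by rw [Bool.and_eq_true]; exact ⟨hany, by simpa using hrow⟩)]

theorem pvStampA_getD_old (pa st : List (List Int)) (x y a b : Nat)
    (hold : (pa.getD a []).getD b 0 = 1) (hlen : a < pa.length) :
    ((stampA pa st x y).getD a []).getD b 0 = 1 := by
  rw [pvStampA_eq_fold]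
  by_cases hax : x ≤ a ∧ a < x + st.length
  · rw [pvStampFoldGetD_hit st.length x a _ pa hax.1 hax.2 hlen]
    unfold rowStamp
    rw [pvGetD_setfold]
    split
    · rfl
    · exact hold
  · rw [pvStampFoldGetD_miss st.length x a _ pa (by omega)]
    exact hold

theorem pvStampA_getD_inv (pa st : List (List Int)) (x y a b : Nat)
    (hlen : a < pa.length) (hv : ((stampA pa st x y).getD a []).getD b 0 = 1) :
    (pa.getD a []).getD b 0 = 1
    ∨ ∃ i j : Nat, i < st.length ∧ j < (st.headD []).length ∧ a = i + x ∧ b = j + y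
        ∧ (st.getD i []).getD j 0 = 1 := by
  rw [pvStampA_eq_fold] at hv
  by_cases hax : x ≤ a ∧ a < x + st.length
  · rw [pvStampFoldGetD_hit st.length x a _ pa hax.1 hax.2 hlen] at hv
    unfold rowStamp at hv
    rw [pvGetD_setfold] at hv
    by_cases hcond : (((List.range (st.headD []).length).any
        (fun j' => ((st.getD (a - x) []).getD j' 0 == 1) && (j' + y == b)))
          && decide (b < (pa.getD a []).length)) = true
    · rw [Bool.and_eq_true, List.any_eq_true] at hcond
      obtain ⟨⟨j, hjm, hj1⟩, -⟩ := hcond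
      rw [List.mem_range] at hjm
      rw [Bool.and_eq_true, beq_iff_eq, beq_iff_eq] at hj1
      exact Or.inr ⟨a - x, j, by omega, hjm, by omega, by omega, hj1.1⟩
    · rw [if_neg hcond] at hv
      exact Or.inl hv
  · rw [pvStampFoldGetD_miss st.length x a _ pa (by omega)] at hv
    exact Or.inl hv

theorem pvStampA_shape (pa st : List (List Int)) (x y : Nat) :
    (stampA pa st x y).length = pa.length
    ∧ ∀ q, ((stampA pa st x y).getD q []).length = (pa.getD q []).length := by
  rw [pvStampA_eq_fold]
  refine ⟨pvModifyLenFold _ _ _ _, fun q => ?_⟩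
  by_cases hlen : q < pa.length
  · by_cases hax : x ≤ q ∧ q < x + st.length
    · rw [pvStampFoldGetD_hit st.length x q _ pa hax.1 hax.2 hlen, pvLength_rowStamp]
    · rw [pvStampFoldGetD_miss st.length x q _ pa (by omega)]
  · rw [List.getD_eq_default _ _ (by rw [pvModifyLenFold]; omega),
        List.getD_eq_default _ _ (by omega)]

theorem pvOccRelStamp (nn mm : Nat) (pa st : List (List Int)) (occ cl : List (Int × Int))
    (hsh : panShape nn mm pa) (hocc : OccRel nn mm pa occ) (hcl : ∀ p, p ∈ cl ↔ oneAt st p)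
    (x y : Nat) (hx : x + st.length ≤ nn) (hy : y + (st.headD []).length ≤ mm) :
    OccRel nn mm (stampA pa st x y)
      (cl.foldl (fun o c => PySem.Set.add o ((x : Int) + c.1, (y : Int) + c.2)) occ) := by
  obtain ⟨hlen, hrows⟩ := hsh
  have hsh' : ∀ q, q < pa.length → y + (st.headD []).length ≤ (pa.getD q []).length := by
    intro q hq
    rw [hrows q (by omega)]
    omega
  intro p
  rw [pvOccUpdateMem]
  constructor
  · rintro (hp | ⟨c, hc, hpc⟩)
    · obtain ⟨i, j, hi, hj, hpij, hv⟩ := (hocc p).mp hp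
      exact ⟨i, j, hi, hj, hpij, pvStampA_getD_old pa st x y i j hv (by omega)⟩
    · obtain ⟨i, j, hi, hj, hcij, hv⟩ := (hcl c).mp hc
      refine ⟨i + x, j + y, by omega, by omega, ?_, ?_⟩
      · rw [hpc, hcij]
        simp only [Prod.mk.injEq]
        refine ⟨?_, ?_⟩ <;> push_cast <;> omega
      · exact pvStampA_getD_hit pa st x y (i + x) (j + y) i j hsh' hi hj rfl rfl hv (by omega)
  · rintro ⟨a, b, ha, hb, hpab, hv⟩
    rcases pvStampA_getD_inv pa st x y a b (by omega) hv with hold | ⟨i, j, hi, hj, hai, hbj, h1⟩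
    · exact Or.inl ((hocc p).mpr ⟨a, b, ha, hb, hpab, hold⟩)
    · refine Or.inr ⟨((i : Int), (j : Int)), (hcl _).mpr ⟨i, j, hi, hj, rfl, h1⟩, ?_⟩
      rw [hpab]
      simp only [Prod.mk.injEq]
      refine ⟨?_, ?_⟩ <;> push_cast <;> omega

-- the position searches -----------------------------------------------------

theorem pvPlaceYA_find (pa st : List (List Int)) (x : Nat) (yl : List Nat) :
    placeYA pa st x yl
      = (yl.find? (fun y => !overlapA pa st x y)).map (fun y => stampA pa st x y) := by
  induction yl with
  | nil => rfl
  | cons y ys ih =>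
    simp only [placeYA, attachA, List.find?_cons]
    cases h : overlapA pa st x y <;> simp [h, ih]



-- correspondence of the two searches over one x
theorem pvPyRangeNat (b : Int) :
    PySem.List.pyRange 0 b = (List.range b.toNat).map (fun (k : Nat) => (k : Int)) := by
  rw [PySem.List.pyRange_one, show b - 0 = b from by ring]
  exact List.map_congr_left (fun k _ => by simp)

theorem pvFindY_gen (nn mm : Nat) (pa st : List (List Int)) (occ cl : List (Int × Int))
    (hocc : OccRel nn mm pa occ) (hcl : ∀ p, p ∈ cl ↔ oneAt st p)
    (x : Nat) (hx : x + st.length ≤ nn) (yl : List Nat)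
    (hyl : ∀ y ∈ yl, y + (st.headD []).length ≤ mm) :
    findYB (blockedB occ cl) (x : Int) (yl.map (fun (k : Nat) => (k : Int)))
      = Option.map (fun (y : Nat) => ((x : Int), (y : Int)))
          (yl.find? (fun y => !overlapA pa st x y)) := by
  induction yl with
  | nil => rfl
  | cons y ys ih =>
    simp only [List.map_cons, findYB, List.find?_cons]
    have hb : List.contains (blockedB occ cl) ((x : Int), (y : Int)) = overlapA pa st x y := by
      rw [Bool.eq_iff_iff, List.contains_iff_mem, pvBlockedMem,
          pvOverlapIff nn mm pa st occ cl hocc hcl x y hx (hyl y (by simp))]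
    rw [hb]
    cases hov : overlapA pa st x y with
    | true =>
      simp only [Bool.not_true, if_pos rfl]
      exact ih (fun y' hy' => hyl y' (by simp [hy']))
    | false => simp

theorem pvFindY_corr (n m : Int) (nn mm : Nat) (hnn : nn = n.toNat) (hmm : mm = m.toNat)
    (pa st : List (List Int)) (occ cl : List (Int × Int))
    (hocc : OccRel nn mm pa occ) (hcl : ∀ p, p ∈ cl ↔ oneAt st p)
    (hm : ((st.headD []).length : Int) ≤ m) (x : Nat) (hx : x + st.length ≤ nn) :
    findYB (blockedB occ cl) (x : Int) (PySem.List.pyRange 0 (m - (st.headD []).length + 1))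
      = Option.map (fun (y : Nat) => ((x : Int), (y : Int)))
          ((List.range ((m - (st.headD []).length + 1).toNat)).find? (fun y => !overlapA pa st x y)) := by
  rw [pvPyRangeNat]
  exact pvFindY_gen nn mm pa st occ cl hocc hcl x hx _
    (fun y hy => by rw [List.mem_range] at hy; omega)

theorem pvFindX_corr (n m : Int) (nn mm : Nat) (hnn : nn = n.toNat) (hmm : mm = m.toNat)
    (pa st : List (List Int)) (occ cl : List (Int × Int))
    (hocc : OccRel nn mm pa occ) (hcl : ∀ p, p ∈ cl ↔ oneAt st p)
    (hm : ((st.headD []).length : Int) ≤ m) (xr : List Nat) (hxr : ∀ x ∈ xr, x + st.length ≤ nn) :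
    (placeXA pa st (List.range ((m - (st.headD []).length + 1).toNat)) xr = none
      ∧ findXB (blockedB occ cl) (PySem.List.pyRange 0 (m - (st.headD []).length + 1))
          (xr.map (fun (x : Nat) => (x : Int))) = none)
    ∨ ∃ x y : Nat, x + st.length ≤ nn ∧ y + (st.headD []).length ≤ mm
        ∧ placeXA pa st (List.range ((m - (st.headD []).length + 1).toNat)) xr
            = some (stampA pa st x y)
        ∧ findXB (blockedB occ cl) (PySem.List.pyRange 0 (m - (st.headD []).length + 1))
            (xr.map (fun (x : Nat) => (x : Int))) = some ((x : Int), (y : Int)) := by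
  induction xr with
  | nil => exact Or.inl ⟨rfl, rfl⟩
  | cons x xs ih =>
    have hx := hxr x (by simp)
    have hcorr := pvFindY_corr n m nn mm hnn hmm pa st occ cl hocc hcl hm x hx
    simp only [List.map_cons, placeXA, findXB, pvPlaceYA_find, hcorr]
    cases hf : (List.range ((m - (st.headD []).length + 1).toNat)).find?
        (fun y => !overlapA pa st x y) with
    | none =>
      simp only [Option.map_none]
      exact ih (fun x' hx' => hxr x' (by simp [hx']))
    | some y =>
      simp only [Option.map_some]
      have hyr := List.mem_range.mp (List.mem_of_find?_eq_some hf)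
      refine Or.inr ⟨x, y, hx, ?_, rfl, rfl⟩
      omega

-- the four-rotation loop ----------------------------------------------------

theorem pvRotLoopRel (n m : Int) (t : Nat) :
    ∀ (st : List (List Int)) (cl : List (Int × Int)) (pa : List (List Int))
      (occ : List (Int × Int)) (res : Int),
    1 ≤ st.length → 1 ≤ (st.headD []).length → rowsOK st →
    panShape n.toNat m.toNat pa → OccRel n.toNat m.toNat pa occ →
    (∀ p, p ∈ cl ↔ oneAt st p) → cl.Nodup → ((cl.length : Int) = countA st) →
    (rotLoopB n m t cl (st.length : Int) ((st.headD []).length : Int) occ res).2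
        = (rotLoopA n m t st pa res).2
    ∧ panShape n.toNat m.toNat (rotLoopA n m t st pa res).1
    ∧ OccRel n.toNat m.toNat (rotLoopA n m t st pa res).1
        (rotLoopB n m t cl (st.length : Int) ((st.headD []).length : Int) occ res).1 := by
  induction t with
  | zero => exact fun st cl pa occ res _ _ _ hsh hocc _ _ _ => ⟨rfl, hsh, hocc⟩
  | succ t ih =>
    intro st cl pa occ res h1 w1 hrows hsh hocc hcl hnd hcnt
    have hrotlen : (rotGrid st).length = (st.headD []).length := pvRotGrid_len st
    have hrothead : ((rotGrid st).headD []).length = st.length := pvRotGrid_head st w1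
    have hclmem' : ∀ p, p ∈ cl.map (fun c => (c.2, (st.length : Int) - 1 - c.1))
        ↔ oneAt (rotGrid st) p := by
      intro p
      rw [List.mem_map, pvOneAt_rot st w1]
      constructor
      · rintro ⟨c, hc, hpc⟩
        exact ⟨c, (hcl c).mp hc, hpc.symm⟩
      · rintro ⟨c, hc, hpc⟩
        exact ⟨c, (hcl c).mpr hc, hpc.symm⟩
    have hnd' : (cl.map (fun c => (c.2, (st.length : Int) - 1 - c.1))).Nodup := hnd.map pvRotInj
    have hcnt' : (((cl.map (fun c => (c.2, (st.length : Int) - 1 - c.1))).length : Int))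
        = countA (rotGrid st) := by
      have hperm : (cl.map (fun c => (c.2, (st.length : Int) - 1 - c.1))).Perm
          (cellsOfB (rotGrid st) ((((rotGrid st).headD []).length : Nat) : Int)) :=
        (List.perm_ext_iff_of_nodup hnd' (pvCellsNodup _ _)).mpr
          (fun p => (hclmem' p).trans (pvCellsMem (rotGrid st) (pvRotGrid_rowsOK st) p).symm)
      rw [hperm.length_eq, ← pvCellsLen (rotGrid st) (pvRotGrid_rowsOK st)]
    have hrec := ih (rotGrid st) (cl.map (fun c => (c.2, (st.length : Int) - 1 - c.1)))
        pa occ res (by rw [hrotlen]; omega) (by rw [hrothead]; omega)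
        (pvRotGrid_rowsOK st) hsh hocc hclmem' hnd' hcnt'
    rw [hrotlen, hrothead] at hrec
    by_cases hfit : ((st.length : Int) ≤ n ∧ (((st.headD []).length : Int) ≤ m))
    · simp only [rotLoopA, rotLoopB]
      rw [if_pos hfit, if_neg (show ¬((st.length : Int) > n ∨ (((st.headD []).length : Int) > m)) by omega)]
      have hxr : ∀ x ∈ List.range ((n - st.length + 1).toNat), x + st.length ≤ n.toNat := by
        intro x hx
        rw [List.mem_range] at hx
        omega
      have hcorr := pvFindX_corr n m n.toNat m.toNat rfl rfl pa st occ cl hocc hcl hfit.2 _ hxr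
      rw [pvPyRangeNat (n - (st.length : Int) + 1)]
      rcases hcorr with ⟨hA, hB⟩ | ⟨x, y, hxb, hyb, hA, hB⟩
      · rw [hA, hB]
        exact hrec
      · rw [hA, hB]
        obtain ⟨hs1, hs2⟩ := pvStampA_shape pa st x y
        refine ⟨by rw [hcnt], ⟨hs1.trans hsh.1, fun q hq => (hs2 q).trans (hsh.2 q hq)⟩, ?_⟩
        exact pvOccRelStamp n.toNat m.toNat pa st occ cl hsh hocc hcl x y hxb hyb
    · simp only [rotLoopA, rotLoopB]
      rw [if_neg hfit, if_pos (show ((st.length : Int) > n ∨ (((st.headD []).length : Int) > m)) by omega)]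
      exact hrec

-- the main loop over the stickers -------------------------------------------

theorem pvOkSticker_facts (st : List (List Int)) (h : okStickerB st = true) :
    1 ≤ st.length ∧ 1 ≤ (st.headD []).length ∧ rowsOK st := by
  cases st with
  | nil => cases h
  | cons r0 tl =>
    unfold okStickerB at h
    rw [Bool.and_eq_true, decide_eq_true_iff] at h
    refine ⟨by simp, by simpa using h.1, ?_⟩
    intro r hr
    have := List.all_eq_true.mp h.2 r hr
    simpa using this

theorem pvMainFold (n m : Int) (stickers : List (List (List Int))) (il : List Nat)
    (hok : ∀ i ∈ il, okStickerB (stickers.getD i []) = true) :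
    ∀ (pa : List (List Int)) (occ : List (Int × Int)) (res : Int),
    panShape n.toNat m.toNat pa → OccRel n.toNat m.toNat pa occ →
    (il.foldl (fun (s : List (Int × Int) × Int) i =>
        let st := stickers.getD i []
        rotLoopB n m 4 (cellsOfB st ((st.headD []).length : Int)) (st.length : Int)
          ((st.headD []).length : Int) s.1 s.2) (occ, res)).2
      = (il.foldl (fun (s : List (List Int) × Int) i =>
          rotLoopA n m 4 (stickers.getD i []) s.1 s.2) (pa, res)).2
    ∧ panShape n.toNat m.toNat (il.foldl (fun (s : List (List Int) × Int) i =>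
          rotLoopA n m 4 (stickers.getD i []) s.1 s.2) (pa, res)).1
    ∧ OccRel n.toNat m.toNat
        (il.foldl (fun (s : List (List Int) × Int) i =>
          rotLoopA n m 4 (stickers.getD i []) s.1 s.2) (pa, res)).1
        (il.foldl (fun (s : List (Int × Int) × Int) i =>
          let st := stickers.getD i []
          rotLoopB n m 4 (cellsOfB st ((st.headD []).length : Int)) (st.length : Int)
            ((st.headD []).length : Int) s.1 s.2) (occ, res)).1 := by
  induction il with
  | nil => exact fun pa occ res hsh hocc => ⟨rfl, hsh, hocc⟩
  | cons i tl ih =>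
    intro pa occ res hsh hocc
    obtain ⟨hh1, hw1, hrows⟩ := pvOkSticker_facts _ (hok i (by simp))
    obtain ⟨hsnd, hsh', hocc'⟩ := pvRotLoopRel n m 4 (stickers.getD i [])
      (cellsOfB (stickers.getD i []) (((stickers.getD i []).headD []).length : Int))
      pa occ res hh1 hw1 hrows hsh hocc
      (fun p => pvCellsMem (stickers.getD i []) hrows p)
      (pvCellsNodup (stickers.getD i []) _)
      (pvCellsLen (stickers.getD i []) hrows).symm
    simp only [List.foldl_cons]
    have hBpair : rotLoopB n m 4
        (cellsOfB (stickers.getD i []) (((stickers.getD i []).headD []).length : Int))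
        ((stickers.getD i []).length : Int) (((stickers.getD i []).headD []).length : Int) occ res
      = ((rotLoopB n m 4
          (cellsOfB (stickers.getD i []) (((stickers.getD i []).headD []).length : Int))
          ((stickers.getD i []).length : Int) (((stickers.getD i []).headD []).length : Int) occ res).1,
         (rotLoopA n m 4 (stickers.getD i []) pa res).2) := Prod.ext rfl hsnd
    rw [hBpair]
    exact ih (fun j hj => hok j (by simp [hj])) _ _ _ hsh' hocc'

-- ===== VERDICT (by name: the statement is the Claim_ definition above) =====
theorem solution_spec : Claim_equal_solution := by
  unfold Claim_equal_solution
  intro n m k stickers _ hpre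
  obtain ⟨hk, hall⟩ := hpre
  unfold Spec_solution solution solution_alt
  have hok : ∀ i ∈ List.range k.toNat, okStickerB (stickers.getD i []) = true := by
    intro i hi
    rw [List.mem_range] at hi
    have hil : i < stickers.length := by omega
    have hmem : stickers.getD i [] ∈ stickers.take k.toNat := by
      rw [List.getD_eq_getElem _ _ hil]
      exact List.mem_take_iff_getElem.mpr ⟨i, by simp; omega, rfl⟩
    exact List.all_eq_true.mp hall _ hmem
  have hshape0 : panShape n.toNat m.toNat
      ((List.range n.toNat).map (fun _ => List.replicate m.toNat (0 : Int))) := by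
    refine ⟨by simp, fun q hq => ?_⟩
    rw [List.getD_eq_getElem?_getD]
    simp [hq]
  have hocc0 : OccRel n.toNat m.toNat
      ((List.range n.toNat).map (fun _ => List.replicate m.toNat (0 : Int))) [] := by
    intro p
    simp only [List.not_mem_nil, false_iff]
    rintro ⟨i, j, hi, hj, -, hv⟩
    rw [List.getD_eq_getElem?_getD] at hv
    simp [hi, hj, List.getElem_replicate] at hv
  exact ((pvMainFold n m stickers (List.range k.toNat) hok
    ((List.range n.toNat).map (fun _ => List.replicate m.toNat (0 : Int))) [] 0 hshape0 hocc0).1).symm
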